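-- pv_equiv track=rewrite | github.com/Bogdy3145/MainProjects | FP/Assignment2/assignment_2.py | property1
-- ===== SOURCE A (Python) =====
-- def get_imaginary(lis,i):
--     return lis[i][1]
--
-- def property1(lis,n):
--     """
--
--     :param lis: the list of numbers
--     :param n: the number of elements in the list
--     :return: the length of the sequence and the position of the last element in this sequence
--     """
--     k=0
--     k=int(k)
--     maximum=0
--     pos=0
--
--     for i in range (n):
--
--         if get_imaginary(lis,i)==0:
--             k=k+1
--         else:
--             if k>maximum:
--                 maximum=k
--                 pos=i
--             k=0
--
--
--     if k > maximum:
--         maximum = k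
--         pos=n
--
--     return maximum,pos
-- ===== SOURCE B (Python) =====
-- def property1(lis, n):
--     """Run-skipping two-pointer scan: jump over each maximal zero-imaginary run at once."""
--     maximum = 0
--     pos = 0
--     i = 0
--     while i < n:
--         if lis[i][1] == 0:
--             j = i + 1
--             while j < n and lis[j][1] == 0:
--                 j += 1
--             if j - i > maximum:
--                 maximum = j - i
--                 pos = j
--             i = j + 1
--         else:
--             i += 1
--     return maximum, pos
-- ===== Notes on version B (the rewrite author's own statement) =====
-- stated objective: alternative
-- what changed: Replaced the per-element run-length counter with end-of-loop flush by a two-pointer scan that jumps over each maximal zero-imaginary run in one inner scan and updates (maximum,pos) at the run boundary, with no carried counter state.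
import Mathlib
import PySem

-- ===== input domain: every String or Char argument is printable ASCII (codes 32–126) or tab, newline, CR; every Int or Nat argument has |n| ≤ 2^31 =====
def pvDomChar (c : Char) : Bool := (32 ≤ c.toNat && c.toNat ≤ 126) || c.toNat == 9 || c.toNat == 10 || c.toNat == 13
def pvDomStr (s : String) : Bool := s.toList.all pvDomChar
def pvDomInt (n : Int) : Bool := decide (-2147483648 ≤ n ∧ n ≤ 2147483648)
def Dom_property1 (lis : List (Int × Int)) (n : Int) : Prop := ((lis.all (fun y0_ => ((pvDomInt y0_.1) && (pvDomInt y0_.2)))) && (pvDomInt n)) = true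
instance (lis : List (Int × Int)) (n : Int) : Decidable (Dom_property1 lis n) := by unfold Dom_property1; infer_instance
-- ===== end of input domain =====

-- B replaces A's carried run-length counter by a two-pointer scan that skips each
-- maximal zero-imaginary run in one inner scan (alternative decomposition, same cost).

-- ===== PORT A =====
-- get_imaginary(lis, i) = lis[i][1]; out-of-range access raises in Python and is excluded by Pre_
def pvGetImaginary (lis : List (Int × Int)) (i : Int) : Int :=
  ((PySem.List.pyGet? lis i).getD (0, 0)).2

def pvStepA (lis : List (Int × Int)) (s : Int × Int × Int) (i : Int) : Int × Int × Int :=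
  if pvGetImaginary lis i = 0 then (s.1 + 1, s.2.1, s.2.2)
  else if s.1 > s.2.1 then (0, s.1, i) else (0, s.2.1, s.2.2)

def property1 (lis : List (Int × Int)) (n : Int) : Int × Int :=
  let s := (PySem.List.pyRange 0 n 1).foldl (pvStepA lis) (0, 0, 0)
  if s.1 > s.2.1 then (s.1, n) else (s.2.1, s.2.2)

-- ===== PORT B =====
def pvImagB (lis : List (Int × Int)) (i : Int) : Int :=
  ((PySem.List.pyGet? lis i).getD (0, 0)).2

-- inner while: advance j while j < n and lis[j][1] == 0
def bScanZeros (lis : List (Int × Int)) (n j : Int) : Int :=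
  if _h : j < n ∧ pvImagB lis j = 0 then bScanZeros lis n (j + 1) else j
termination_by (n - j).toNat
decreasing_by omega

-- needed by bLoop's termination proof (cited in its decreasing_by)
lemma bScanZeros_ge (lis : List (Int × Int)) (n j : Int) : j ≤ bScanZeros lis n j := by
  have h : ∀ t (j : Int), (n - j).toNat = t → j ≤ bScanZeros lis n j := by
    intro t
    induction t using Nat.strong_induction_on with
    | _ t ih =>
      intro j ht
      rw [bScanZeros]
      split
      · next h' =>
        have := ih (n - (j + 1)).toNat (by omega) (j + 1) rfl
        omega
      · omega
  exact h _ j rfl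

-- outer while of B
def bLoop (lis : List (Int × Int)) (n i maximum pos : Int) : Int × Int :=
  if _h : i < n then
    if pvImagB lis i = 0 then
      let j := bScanZeros lis n (i + 1)
      if j - i > maximum then bLoop lis n (j + 1) (j - i) j
      else bLoop lis n (j + 1) maximum pos
    else bLoop lis n (i + 1) maximum pos
  else (maximum, pos)
termination_by (n - i).toNat
decreasing_by
  · have := bScanZeros_ge lis n (i + 1); omega
  · have := bScanZeros_ge lis n (i + 1); omega
  · omega

def property1_alt (lis : List (Int × Int)) (n : Int) : Int × Int :=
  bLoop lis n 0 0 0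

-- ===== PRECONDITION & SPEC =====
-- Pre_ excludes exactly the inputs on which Python A raises IndexError (n > len(lis)).
def Pre_property1 (lis : List (Int × Int)) (n : Int) : Prop := n ≤ (lis.length : Int)
instance (lis : List (Int × Int)) (n : Int) : Decidable (Pre_property1 lis n) := by unfold Pre_property1; infer_instance
def pvWitness_property1 : (List (Int × Int)) × Int := ([(1, 0), (2, 3), (4, 0)], 3)

def Spec_property1 (lis : List (Int × Int)) (n : Int) (out : Int × Int) : Prop := out = property1_alt lis n
instance (lis : List (Int × Int)) (n : Int) (out : Int × Int) : Decidable (Spec_property1 lis n out) := by unfold Spec_property1; infer_instance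

-- ===== CLAIM (what is proved, stated in full; the proofs are below) =====
def Claim_equal_property1 : Prop := ∀ (lis : List (Int × Int)) (n : Int), Dom_property1 lis n → Pre_property1 lis n → Spec_property1 lis n (property1 lis n)

-- ===== LEMMAS AND PROOFS =====

-- A's loop body written as index recursion (proof-only helper)
def aLoop (lis : List (Int × Int)) (n i k maximum pos : Int) : Int × Int :=
  if _h : i < n then
    if pvGetImaginary lis i = 0 then aLoop lis n (i + 1) (k + 1) maximum pos
    else if k > maximum then aLoop lis n (i + 1) 0 k i
    else aLoop lis n (i + 1) 0 maximum pos
  else if k > maximum then (k, n) else (maximum, pos)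
termination_by (n - i).toNat
decreasing_by all_goals omega

lemma bScanZeros_le (lis : List (Int × Int)) (n j : Int) (hj : j ≤ n) :
    bScanZeros lis n j ≤ n := by
  have h : ∀ t (j : Int), (n - j).toNat = t → j ≤ n → bScanZeros lis n j ≤ n := by
    intro t
    induction t using Nat.strong_induction_on with
    | _ t ih =>
      intro j ht hj
      rw [bScanZeros]
      split
      · next h' =>
        exact ih (n - (j + 1)).toNat (by omega) (j + 1) rfl (by omega)
      · omega
  exact h _ j rfl hj

lemma foldA_eq_aLoop (lis : List (Int × Int)) (n : Int) :
    ∀ (i k maximum pos : Int),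
      (let s := (PySem.List.pyRange i n 1).foldl (pvStepA lis) (k, maximum, pos)
       if s.1 > s.2.1 then (s.1, n) else (s.2.1, s.2.2)) = aLoop lis n i k maximum pos := by
  intro i k maximum pos
  have h : ∀ t (i k maximum pos : Int), (n - i).toNat = t →
      (let s := (PySem.List.pyRange i n 1).foldl (pvStepA lis) (k, maximum, pos)
       if s.1 > s.2.1 then (s.1, n) else (s.2.1, s.2.2)) = aLoop lis n i k maximum pos := by
    intro t
    induction t using Nat.strong_induction_on with
    | _ t ih =>
      intro i k maximum pos ht
      rw [aLoop]
      by_cases hi : i < n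
      · rw [PySem.List.pyRange_one_cons hi]
        simp only [List.foldl_cons, dif_pos hi]
        rw [show pvStepA lis (k, maximum, pos) i =
            (if pvGetImaginary lis i = 0 then (k + 1, maximum, pos)
             else if k > maximum then (0, k, i) else (0, maximum, pos)) from rfl]
        split
        · exact ih (n - (i + 1)).toNat (by omega) (i + 1) (k + 1) maximum pos rfl
        · split
          · exact ih (n - (i + 1)).toNat (by omega) (i + 1) 0 k i rfl
          · exact ih (n - (i + 1)).toNat (by omega) (i + 1) 0 maximum pos rfl
      · have : PySem.List.pyRange i n 1 = [] := by
          simp [PySem.List.pyRange_one, show (n - i).toNat = 0 by omega]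
        rw [this]
        simp [dif_neg hi]
  exact h _ i k maximum pos rfl

-- consuming a zero-run: aLoop from inside a run equals the run-boundary update
lemma aLoop_scan (lis : List (Int × Int)) (n : Int) :
    ∀ t (j k maximum pos : Int), (n - j).toNat = t →
      aLoop lis n j k maximum pos =
        (let j' := bScanZeros lis n j
         let k' := k + (j' - j)
         if j' < n then
           (if k' > maximum then aLoop lis n (j' + 1) 0 k' j'
            else aLoop lis n (j' + 1) 0 maximum pos)
         else
           (if k' > maximum then (k', n) else (maximum, pos))) := by
  intro t
  induction t using Nat.strong_induction_on with
  | _ t ih =>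
    intro j k maximum pos ht
    rw [bScanZeros]
    by_cases hcond : j < n ∧ pvGetImaginary lis j = 0
    · rw [dif_pos (by exact hcond)]
      rw [aLoop, dif_pos hcond.1, if_pos hcond.2]
      rw [ih (n - (j + 1)).toNat (by omega) (j + 1) (k + 1) maximum pos rfl]
      simp only []
      have harith : k + 1 + (bScanZeros lis n (j + 1) - (j + 1)) =
          k + (bScanZeros lis n (j + 1) - j) := by ring
      rw [harith]
    · rw [dif_neg (by exact hcond)]
      simp only []
      rw [aLoop]
      by_cases hj : j < n
      · have hz : ¬ pvGetImaginary lis j = 0 := fun hz => hcond ⟨hj, hz⟩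
        rw [dif_pos hj, if_neg hz, if_pos hj]
        simp only [show k + (j - j) = k by ring]
      · rw [dif_neg hj, if_neg hj]
        simp only [show k + (j - j) = k by ring]

lemma aLoop_eq_bLoop (lis : List (Int × Int)) (n : Int) :
    ∀ t (i maximum pos : Int), (n - i).toNat = t → 0 ≤ maximum →
      aLoop lis n i 0 maximum pos = bLoop lis n i maximum pos := by
  intro t
  induction t using Nat.strong_induction_on with
  | _ t ih =>
    intro i maximum pos ht hm
    rw [bLoop]
    by_cases hi : i < n
    · rw [dif_pos hi]
      by_cases hz : pvImagB lis i = 0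
      · rw [if_pos hz]
        rw [aLoop, dif_pos hi, if_pos (show pvGetImaginary lis i = 0 from hz)]
        norm_num only
        rw [aLoop_scan lis n (n - (i + 1)).toNat (i + 1) 1 maximum pos rfl]
        have hge := bScanZeros_ge lis n (i + 1)
        have hle := bScanZeros_le lis n (i + 1) (by omega)
        simp only []
        set j := bScanZeros lis n (i + 1) with hjdef
        have harith : 1 + (j - (i + 1)) = j - i := by ring
        rw [harith]
        by_cases hjn : j < n
        · rw [if_pos hjn]
          split
          · exact ih (n - (j + 1)).toNat (by omega) (j + 1) (j - i) j rfl (by omega)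
          · exact ih (n - (j + 1)).toNat (by omega) (j + 1) maximum pos rfl hm
        · rw [if_neg hjn]
          have hjeq : j = n := by omega
          rw [bLoop]
          have hnl : ¬ j + 1 < n := by omega
          rw [dif_neg hnl]
          split
          · rw [hjeq]
          · rw [bLoop, dif_neg hnl]
      · rw [if_neg hz]
        rw [aLoop, dif_pos hi, if_neg (show ¬ pvGetImaginary lis i = 0 from hz), if_neg (by omega : ¬ (0:Int) > maximum)]
        exact ih (n - (i + 1)).toNat (by omega) (i + 1) maximum pos rfl hm
    · rw [dif_neg hi]
      rw [aLoop, dif_neg hi, if_neg (by omega : ¬ (0:Int) > maximum)]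

-- ===== VERDICT (by name: the statement is the Claim_ definition above) =====
theorem property1_spec : Claim_equal_property1 := by
  intro lis n _ _
  unfold Spec_property1 property1 property1_alt
  rw [foldA_eq_aLoop lis n 0 0 0 0]
  exact aLoop_eq_bLoop lis n (n - 0).toNat 0 0 0 rfl (by omega)
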